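-- pv_equiv track=rewrite | github.com/vaishnabala/NLP_Phonetic-Semantic-Mapping | src/g2p_converter.py | _approximate_phoneme
-- ===== SOURCE A (Python) =====
-- def _approximate_phoneme(word):
--     """
--     Generate approximate phonemes for unknown words.
--
--     This uses simple letter-to-sound rules.
--     """
--     # Basic mapping for Roman letters to IPA sounds
--     letter_map = {
--         'a': 'ə', 'aa': 'aː', 'i': 'ɪ', 'ii': 'iː', 'ee': 'iː',
--         'u': 'ʊ', 'uu': 'uː', 'oo': 'uː', 'e': 'eː', 'o': 'oː',
--         'ai': 'aɪ', 'au': 'aʊ', 'ou': 'aʊ', 'oi': 'ɔɪ',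
--         'k': 'k', 'kh': 'kʰ', 'g': 'g', 'gh': 'gʰ',
--         'ch': 'tʃ', 'chh': 'tʃʰ', 'j': 'dʒ', 'jh': 'dʒʰ',
--         't': 't', 'th': 'tʰ', 'd': 'd', 'dh': 'dʰ',
--         'n': 'n', 'p': 'p', 'ph': 'f', 'f': 'f',
--         'b': 'b', 'bh': 'bʰ', 'm': 'm',
--         'y': 'j', 'r': 'r', 'l': 'l', 'v': 'v', 'w': 'w',
--         's': 's', 'sh': 'ʃ', 'h': 'h', 'z': 'z',
--         'c': 'k', 'q': 'k', 'x': 'ks',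
--         'ng': 'ŋ',
--     }
--
--     result = ""
--     i = 0
--     while i < len(word):
--         # Check for two-letter combinations first
--         if i < len(word) - 1:
--             two_char = word[i:i+2]
--             if two_char in letter_map:
--                 result += letter_map[two_char]
--                 i += 2
--                 continue
--
--         # Single character
--         char = word[i]
--         if char in letter_map:
--             result += letter_map[char]
--         else:
--             result += char
--         i += 1
--
--     return result
-- ===== SOURCE B (Python) =====
-- # Single pass over the characters with a one-character "pending" buffer:
-- # when the pending letter and the current letter form a digraph, emit its
-- # IPA value; otherwise emit the pending letter's own sound and keep the
-- # current letter pending.  No index arithmetic, no slicing.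
--
-- _DIGRAPHS = {
--     'aa': 'aː', 'ii': 'iː', 'ee': 'iː', 'uu': 'uː', 'oo': 'uː',
--     'ai': 'aɪ', 'au': 'aʊ', 'ou': 'aʊ', 'oi': 'ɔɪ',
--     'kh': 'kʰ', 'gh': 'gʰ', 'ch': 'tʃ', 'jh': 'dʒʰ',
--     'th': 'tʰ', 'dh': 'dʰ', 'ph': 'f', 'bh': 'bʰ',
--     'sh': 'ʃ', 'ng': 'ŋ',
-- }
--
-- _SINGLES = {
--     'a': 'ə', 'i': 'ɪ', 'u': 'ʊ', 'e': 'eː', 'o': 'oː',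
--     'k': 'k', 'g': 'g', 'j': 'dʒ', 't': 't', 'd': 'd',
--     'n': 'n', 'p': 'p', 'f': 'f', 'b': 'b', 'm': 'm',
--     'y': 'j', 'r': 'r', 'l': 'l', 'v': 'v', 'w': 'w',
--     's': 's', 'h': 'h', 'z': 'z', 'c': 'k', 'q': 'k', 'x': 'ks',
-- }
--
--
-- def _approximate_phoneme(word):
--     out = ""
--     pending = None
--     for c in word:
--         if pending is None:
--             pending = c
--         elif pending + c in _DIGRAPHS:
--             out += _DIGRAPHS[pending + c]
--             pending = None
--         else:
--             out += _SINGLES.get(pending, pending)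
--             pending = c
--     if pending is not None:
--         out += _SINGLES.get(pending, pending)
--     return out
-- ===== Notes on version B (the rewrite author's own statement) =====
-- stated objective: alternative
-- what changed: A's index-based while-loop that slices word[i:i+2] and looks up one combined dict is replaced by a single character-by-character pass with a one-character pending buffer and two separate tables (digraphs vs singles); no indices or slices are used.
import Mathlib
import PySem

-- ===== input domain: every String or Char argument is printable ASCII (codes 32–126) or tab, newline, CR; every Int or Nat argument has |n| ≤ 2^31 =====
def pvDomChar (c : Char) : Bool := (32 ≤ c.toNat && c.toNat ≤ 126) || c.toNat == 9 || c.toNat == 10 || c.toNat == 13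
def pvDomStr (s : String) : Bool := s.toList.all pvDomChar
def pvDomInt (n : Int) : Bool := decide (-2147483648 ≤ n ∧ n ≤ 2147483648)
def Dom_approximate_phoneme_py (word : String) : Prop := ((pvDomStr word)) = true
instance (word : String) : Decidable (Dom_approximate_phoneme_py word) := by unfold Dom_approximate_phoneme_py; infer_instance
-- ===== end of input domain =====

-- B replaces A's index/slice while-loop over one combined dict by a single char-by-char
-- pass with a one-character pending buffer and two separate tables (alternative); return
-- values proved equal on all inputs.

-- ===== PORT A =====
-- Python dict literal with pairwise-distinct keys; keys/values kept as List Char so the kernel can compute on them.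
def letterMap : PySem.Dict (List Char) (List Char) := PySem.Dict.mk [
  (['a'], ['ə']), (['a','a'], ['a','ː']), (['i'], ['ɪ']), (['i','i'], ['i','ː']), (['e','e'], ['i','ː']),
  (['u'], ['ʊ']), (['u','u'], ['u','ː']), (['o','o'], ['u','ː']), (['e'], ['e','ː']), (['o'], ['o','ː']),
  (['a','i'], ['a','ɪ']), (['a','u'], ['a','ʊ']), (['o','u'], ['a','ʊ']), (['o','i'], ['ɔ','ɪ']),
  (['k'], ['k']), (['k','h'], ['k','ʰ']), (['g'], ['g']), (['g','h'], ['g','ʰ']),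
  (['c','h'], ['t','ʃ']), (['c','h','h'], ['t','ʃ','ʰ']), (['j'], ['d','ʒ']), (['j','h'], ['d','ʒ','ʰ']),
  (['t'], ['t']), (['t','h'], ['t','ʰ']), (['d'], ['d']), (['d','h'], ['d','ʰ']),
  (['n'], ['n']), (['p'], ['p']), (['p','h'], ['f']), (['f'], ['f']),
  (['b'], ['b']), (['b','h'], ['b','ʰ']), (['m'], ['m']),
  (['y'], ['j']), (['r'], ['r']), (['l'], ['l']), (['v'], ['v']), (['w'], ['w']),
  (['s'], ['s']), (['s','h'], ['ʃ']), (['h'], ['h']), (['z'], ['z']),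
  (['c'], ['k']), (['q'], ['k']), (['x'], ['k','s']),
  (['n','g'], ['ŋ'])]

-- A's while-loop: index i (starts at 0, only incremented — carried as Nat),
-- word[i:i+2] is (drop i).take 2 (exact for 0 ≤ i), and the Python `continue`
-- is the fall-through to the single-character code.
def aLoop (w : List Char) (result : List Char) (i : Nat) : List Char :=
  if h : i < w.length then
    if i + 1 < w.length then
      match PySem.Dict.get? letterMap ((w.drop i).take 2) with
      | some v => aLoop w (result ++ v) (i + 2)
      | none =>
        let c := w[i]
        aLoop w (result ++ PySem.Dict.getD letterMap [c] [c]) (i + 1)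
    else
      let c := w[i]
      aLoop w (result ++ PySem.Dict.getD letterMap [c] [c]) (i + 1)
  else result
termination_by w.length - i

def approximate_phoneme_py (word : String) : String :=
  String.ofList (aLoop word.toList [] 0)

-- ===== PORT B =====
-- Source B's two module-level dicts, string keys and string values as in the Python.
def digraphsB : PySem.Dict String String := PySem.Dict.mk [
  ("aa", "aː"), ("ii", "iː"), ("ee", "iː"), ("uu", "uː"), ("oo", "uː"),
  ("ai", "aɪ"), ("au", "aʊ"), ("ou", "aʊ"), ("oi", "ɔɪ"),
  ("kh", "kʰ"), ("gh", "gʰ"), ("ch", "tʃ"), ("jh", "dʒʰ"),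
  ("th", "tʰ"), ("dh", "dʰ"), ("ph", "f"), ("bh", "bʰ"),
  ("sh", "ʃ"), ("ng", "ŋ")]

def singlesB : PySem.Dict String String := PySem.Dict.mk [
  ("a", "ə"), ("i", "ɪ"), ("u", "ʊ"), ("e", "eː"), ("o", "oː"),
  ("k", "k"), ("g", "g"), ("j", "dʒ"), ("t", "t"), ("d", "d"),
  ("n", "n"), ("p", "p"), ("f", "f"), ("b", "b"), ("m", "m"),
  ("y", "j"), ("r", "r"), ("l", "l"), ("v", "v"), ("w", "w"),
  ("s", "s"), ("h", "h"), ("z", "z"), ("c", "k"), ("q", "k"), ("x", "ks")]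

-- _SINGLES.get(p, p): the pending character's own sound (string accumulation is done
-- on List Char, the exact PySem bridge for Python `out += s`).
def emitSingle (p : Char) : List Char :=
  (PySem.Dict.getD singlesB (String.ofList [p]) (String.ofList [p])).toList

-- One iteration of Source B's for-loop: state = (out so far, pending character).
def stepB (st : List Char × Option Char) (c : Char) : List Char × Option Char :=
  match st with
  | (out, none) => (out, some c)
  | (out, some p) =>
    match PySem.Dict.get? digraphsB (String.ofList [p, c]) with
    | some v => (out ++ v.toList, none)
    | none => (out ++ emitSingle p, some c)

def approximate_phoneme_py_alt (word : String) : String :=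
  let st := word.toList.foldl stepB ([], none)
  match st.2 with
  | none => String.ofList st.1
  | some p => String.ofList (st.1 ++ emitSingle p)

-- ===== PRECONDITION & SPEC =====
def Spec_approximate_phoneme_py (word : String) (out : String) : Prop := out = approximate_phoneme_py_alt word
instance (word : String) (out : String) : Decidable (Spec_approximate_phoneme_py word out) := by unfold Spec_approximate_phoneme_py; infer_instance

-- ===== CLAIM (what is proved, stated in full; the proofs are below) =====
def Claim_equal_approximate_phoneme_py : Prop := ∀ (word : String), Dom_approximate_phoneme_py word → Spec_approximate_phoneme_py word (approximate_phoneme_py word)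

-- ===== LEMMAS AND PROOFS =====

-- Proof-only middle form: A's loop as a pair-consuming recursion on the character list.
def gScan : List Char → List Char
  | [] => []
  | [c] => PySem.Dict.getD letterMap [c] [c]
  | c1 :: c2 :: rest =>
    match PySem.Dict.get? letterMap [c1, c2] with
    | some v => v ++ gScan rest
    | none => PySem.Dict.getD letterMap [c1] [c1] ++ gScan (c2 :: rest)

theorem aLoop_eq_gScan (w : List Char) :
    ∀ (n i : Nat) (result : List Char), w.length - i = n → i ≤ w.length →
      aLoop w result i = result ++ gScan (w.drop i) := by
  intro n
  induction n using Nat.strong_induction_on with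
  | _ n ih =>
    intro i result hn hle
    rw [aLoop]
    by_cases h : i < w.length
    · have hdrop : w.drop i = w[i] :: w.drop (i + 1) := List.drop_eq_getElem_cons h
      by_cases h2 : i + 1 < w.length
      · have hdrop2 : w.drop (i + 1) = w[i + 1] :: w.drop (i + 2) := List.drop_eq_getElem_cons h2
        have htake : (w.drop i).take 2 = [w[i], w[i + 1]] := by
          rw [hdrop, hdrop2]; rfl
        simp only [dif_pos h, if_pos h2, htake]
        cases hget : PySem.Dict.get? letterMap [w[i], w[i + 1]] with
        | some v =>
          dsimp only
          rw [ih (w.length - (i + 2)) (by omega) (i + 2) _ rfl (by omega)]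
          rw [hdrop, hdrop2, gScan]
          simp [hget, List.append_assoc]
        | none =>
          dsimp only
          rw [ih (w.length - (i + 1)) (by omega) (i + 1) _ rfl (by omega)]
          rw [hdrop, hdrop2, gScan]
          simp [hget, ← hdrop2, List.append_assoc]
      · have hnil : w.drop (i + 1) = [] := by
          apply List.drop_eq_nil_of_le; omega
        simp only [dif_pos h, if_neg h2]
        rw [ih (w.length - (i + 1)) (by omega) (i + 1) _ rfl (by omega)]
        rw [hdrop, hnil, gScan]
        simp [gScan]
    · have hnil : w.drop i = [] := List.drop_eq_nil_of_le (by omega)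
      simp [dif_neg h, hnil, gScan]

-- String equality of ofList images is list equality.
theorem ofList_beq (s t : List Char) : (String.ofList s == String.ofList t) = (s == t) := by
  simp [String.toList_inj.symm]

-- The 2- and 1-character-key portions of A's map, as plain pair lists.
def twoPairs : List (List Char × List Char) := [
  (['a', 'a'], ['a', 'ː']),
  (['i', 'i'], ['i', 'ː']),
  (['e', 'e'], ['i', 'ː']),
  (['u', 'u'], ['u', 'ː']),
  (['o', 'o'], ['u', 'ː']),
  (['a', 'i'], ['a', 'ɪ']),
  (['a', 'u'], ['a', 'ʊ']),
  (['o', 'u'], ['a', 'ʊ']),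
  (['o', 'i'], ['ɔ', 'ɪ']),
  (['k', 'h'], ['k', 'ʰ']),
  (['g', 'h'], ['g', 'ʰ']),
  (['c', 'h'], ['t', 'ʃ']),
  (['j', 'h'], ['d', 'ʒ', 'ʰ']),
  (['t', 'h'], ['t', 'ʰ']),
  (['d', 'h'], ['d', 'ʰ']),
  (['p', 'h'], ['f']),
  (['b', 'h'], ['b', 'ʰ']),
  (['s', 'h'], ['ʃ']),
  (['n', 'g'], ['ŋ'])]

def onePairs : List (List Char × List Char) := [
  (['a'], ['ə']),
  (['i'], ['ɪ']),
  (['u'], ['ʊ']),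
  (['e'], ['e', 'ː']),
  (['o'], ['o', 'ː']),
  (['k'], ['k']),
  (['g'], ['g']),
  (['j'], ['d', 'ʒ']),
  (['t'], ['t']),
  (['d'], ['d']),
  (['n'], ['n']),
  (['p'], ['p']),
  (['f'], ['f']),
  (['b'], ['b']),
  (['m'], ['m']),
  (['y'], ['j']),
  (['r'], ['r']),
  (['l'], ['l']),
  (['v'], ['v']),
  (['w'], ['w']),
  (['s'], ['s']),
  (['h'], ['h']),
  (['z'], ['z']),
  (['c'], ['k']),
  (['q'], ['k']),
  (['x'], ['k', 's'])]

-- Keys whose length differs from the query's never match: they can be filtered out.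
theorem get?_filter_len (l : List (List Char × List Char)) (n : Nat) (t : List Char)
    (ht : t.length = n) :
    PySem.Dict.get? (PySem.Dict.mk (l.filter (fun kv => kv.1.length == n))) t =
      PySem.Dict.get? (PySem.Dict.mk l) t := by
  induction l with
  | nil => rfl
  | cons kv l ih =>
    obtain ⟨k, v⟩ := kv
    by_cases hk : k.length = n
    · rw [show ((k, v) :: l).filter (fun kv => kv.1.length == n)
          = (k, v) :: l.filter (fun kv => kv.1.length == n) from by simp [hk]]
      rw [PySem.Dict.get?_mk_cons, PySem.Dict.get?_mk_cons, ih]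
    · rw [show ((k, v) :: l).filter (fun kv => kv.1.length == n)
          = l.filter (fun kv => kv.1.length == n) from by simp [hk]]
      rw [PySem.Dict.get?_mk_cons, if_neg, ih]
      simp only [beq_iff_eq]
      intro hkt
      exact hk (hkt ▸ ht)

-- Lookup in the String-keyed image of a List-Char-keyed dict.
theorem get?_mapOfList (l : List (List Char × List Char)) (t : List Char) :
    PySem.Dict.get? (PySem.Dict.mk
        (l.map (fun kv => (String.ofList kv.1, String.ofList kv.2)))) (String.ofList t) =
      (PySem.Dict.get? (PySem.Dict.mk l) t).map String.ofList := by
  induction l with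
  | nil => rfl
  | cons kv l ih =>
    obtain ⟨k, v⟩ := kv
    simp only [List.map_cons, PySem.Dict.get?_mk_cons, ofList_beq]
    by_cases h : (k == t) = true
    · simp [h]
    · simp only [Bool.not_eq_true] at h
      simp [h, ih]

theorem twoPairs_filter : letterMap.items.filter (fun kv => kv.1.length == 2) = twoPairs := by
  decide

theorem onePairs_filter : letterMap.items.filter (fun kv => kv.1.length == 1) = onePairs := by
  decide

theorem digraphsB_map : digraphsB = PySem.Dict.mk
    (twoPairs.map (fun kv => (String.ofList kv.1, String.ofList kv.2))) := by decide

theorem singlesB_map : singlesB = PySem.Dict.mk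
    (onePairs.map (fun kv => (String.ofList kv.1, String.ofList kv.2))) := by decide

-- B's digraph table agrees with the 2-character lookups of A's combined map.
theorem two_lookup (p c : Char) :
    PySem.Dict.get? letterMap [p, c] =
      (PySem.Dict.get? digraphsB (String.ofList [p, c])).map String.toList := by
  rw [digraphsB_map, get?_mapOfList twoPairs [p, c], ← twoPairs_filter,
    get?_filter_len letterMap.items 2 [p, c] rfl]
  cases PySem.Dict.get? (PySem.Dict.mk letterMap.items) [p, c] <;> simp

-- B's singles table agrees with the 1-character lookups of A's combined map.
theorem one_lookup (p : Char) : PySem.Dict.getD letterMap [p] [p] = emitSingle p := by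
  unfold emitSingle
  rw [PySem.Dict.getD, PySem.Dict.getD, singlesB_map, get?_mapOfList onePairs [p],
    ← onePairs_filter, get?_filter_len letterMap.items 1 [p] rfl]
  cases PySem.Dict.get? (PySem.Dict.mk letterMap.items) [p] <;> simp

def pendList : Option Char → List Char
  | none => []
  | some p => [p]

def finishB (st : List Char × Option Char) : List Char :=
  match st.2 with
  | none => st.1
  | some p => st.1 ++ emitSingle p

theorem fold_fin (l : List Char) : ∀ (out : List Char) (pend : Option Char),
    finishB (l.foldl stepB (out, pend)) = out ++ gScan (pendList pend ++ l) := by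
  induction l with
  | nil =>
    intro out pend
    cases pend with
    | none => simp [finishB, pendList, gScan]
    | some p => simp [finishB, pendList, gScan, one_lookup]
  | cons c l ih =>
    intro out pend
    cases pend with
    | none =>
      simp only [List.foldl_cons, stepB, pendList, List.nil_append]
      exact ih out (some c)
    | some p =>
      simp only [List.foldl_cons, pendList, List.cons_append, List.nil_append]
      rw [gScan]
      cases hget : PySem.Dict.get? digraphsB (String.ofList [p, c]) with
      | some v =>
        have hA : PySem.Dict.get? letterMap [p, c] = some v.toList := by
          rw [two_lookup, hget]; rfl
        simp only [stepB, hget, hA, ih, pendList, List.nil_append, List.append_assoc]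
      | none =>
        have hA : PySem.Dict.get? letterMap [p, c] = none := by
          rw [two_lookup, hget]; rfl
        simp only [stepB, hget, hA, ih, pendList, List.cons_append, List.nil_append,
          one_lookup, List.append_assoc]

theorem ports_eq (word : String) : approximate_phoneme_py word = approximate_phoneme_py_alt word := by
  unfold approximate_phoneme_py approximate_phoneme_py_alt
  rw [aLoop_eq_gScan word.toList (word.toList.length - 0) 0 [] rfl (Nat.zero_le _)]
  have h := fold_fin word.toList [] none
  simp only [pendList, List.nil_append] at h
  rw [show (match (word.toList.foldl stepB ([], none)).2 with
      | none => String.ofList (word.toList.foldl stepB ([], none)).1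
      | some p => String.ofList ((word.toList.foldl stepB ([], none)).1 ++ emitSingle p))
      = String.ofList (finishB (word.toList.foldl stepB ([], none))) from by
    unfold finishB; cases (word.toList.foldl stepB ([], none)).2 <;> rfl]
  rw [h]
  simp

-- ===== VERDICT (by name: the statement is the Claim_ definition above) =====
theorem approximate_phoneme_py_spec : Claim_equal_approximate_phoneme_py := by
  intro word _
  exact ports_eq word
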